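-- pv_equiv track=rewrite | github.com/Kryps1s/BuzzHub-API | lambdas/get_events.py | filter_events_by_beekeeping
-- ===== SOURCE A (Python) =====
-- def filter_events_by_beekeeping(item, hives, jobs):
--     """Filter beekeeping events by hives and jobs"""
--     if hives is not None:
--         filtered_events = []
--         for beekeeping_event in item['events']:
--             #if no union between hive and beekeeping_event, remove beekeeping_event
--             #check if array contains ALL
--             if len(set(hives).intersection(set(beekeeping_event["hives"]))) > 0 or \
--                 "ALL" in beekeeping_event["hives"]:
--                 filtered_events.append(beekeeping_event)
--         item['events'] = filtered_events
--     if jobs is not None: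
--         filtered_events = []
--         for beekeeping_event in item['events']:
--             #if no union between hive and beekeeping_event, remove beekeeping_event
--             if len(set(jobs).intersection(set(beekeeping_event["jobs"]))) > 0:
--                 filtered_events.append(beekeeping_event)
--         item['events'] = filtered_events
--     return item
-- ===== SOURCE B (Python) =====
-- def filter_events_by_beekeeping(item, hives, jobs):
--     """Filter beekeeping events by hives and jobs: one pass with a combined predicate."""
--     if hives is None and jobs is None:
--         return item
--
--     def keep(event):
--         if hives is not None:
--             if not (set(hives) & set(event["hives"])) and "ALL" not in event["hives"]:
--                 return False
--         return jobs is None or bool(set(jobs) & set(event["jobs"]))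
--
--     item['events'] = [event for event in item['events'] if keep(event)]
--     return item
-- ===== Notes on version B (the rewrite author's own statement) =====
-- stated objective: simpler
-- what changed: Replaces A's two sequential filtering loops (each rebuilding and reassigning item['events']) with a single pass applying one combined keep-predicate and one assignment, with an early return when both filters are None.
import Mathlib
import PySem

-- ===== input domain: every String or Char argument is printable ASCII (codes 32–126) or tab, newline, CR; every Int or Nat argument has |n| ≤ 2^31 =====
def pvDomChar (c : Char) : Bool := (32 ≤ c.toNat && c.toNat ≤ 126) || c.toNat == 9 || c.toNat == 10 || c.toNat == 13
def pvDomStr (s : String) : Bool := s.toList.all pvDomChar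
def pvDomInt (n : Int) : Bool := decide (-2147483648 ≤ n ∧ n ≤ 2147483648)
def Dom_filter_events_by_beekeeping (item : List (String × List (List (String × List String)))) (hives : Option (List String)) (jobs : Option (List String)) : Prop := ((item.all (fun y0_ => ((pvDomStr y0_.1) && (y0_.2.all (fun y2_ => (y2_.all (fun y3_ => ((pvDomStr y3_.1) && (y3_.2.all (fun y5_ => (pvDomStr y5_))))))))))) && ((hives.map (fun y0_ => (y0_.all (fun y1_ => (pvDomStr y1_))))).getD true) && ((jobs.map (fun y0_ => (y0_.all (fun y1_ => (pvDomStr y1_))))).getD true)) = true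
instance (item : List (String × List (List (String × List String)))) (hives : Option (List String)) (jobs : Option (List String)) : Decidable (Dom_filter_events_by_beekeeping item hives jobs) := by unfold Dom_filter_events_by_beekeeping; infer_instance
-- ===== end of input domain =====

-- ===== PORT A =====
-- B replaces A's two sequential filtering passes over item['events'] by one pass with a
-- combined predicate and a single assignment (objective: simpler).  Equivalence is about the
-- returned value; both programs also assign item['events'] (A mutates even when jobs is None).

-- len(set(xs).intersection(set(ys))) > 0  /  truthiness of set(xs) & set(ys)
def pvIntersects (xs ys : List String) : Bool :=
  decide (0 < PySem.Set.len (PySem.Set.inter (PySem.Set.ofList xs) (PySem.Set.ofList ys)))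

-- the hives-loop condition of A (also the hives clause of B's keep)
def pvHivesPass (hs : List String) (ev : List (String × List String)) : Bool :=
  let evh := ((PySem.Dict.mk ev).get? "hives").getD []
  pvIntersects hs evh || evh.contains "ALL"

-- the jobs-loop condition of A (also the jobs clause of B's keep)
def pvJobsPass (js : List String) (ev : List (String × List String)) : Bool :=
  pvIntersects js (((PySem.Dict.mk ev).get? "jobs").getD [])

def filter_events_by_beekeeping (item : List (String × List (List (String × List String)))) (hives : Option (List String)) (jobs : Option (List String)) : List (String × List (List (String × List String))) :=
  let d : PySem.Dict String (List (List (String × List String))) := PySem.Dict.mk item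
  let d1 := match hives with
    | none => d
    | some hs =>
      let filtered := ((d.get? "events").getD []).foldl
        (fun acc ev => if pvHivesPass hs ev then acc ++ [ev] else acc) []
      d.insert "events" filtered
  let d2 := match jobs with
    | none => d1
    | some js =>
      let filtered := ((d1.get? "events").getD []).foldl
        (fun acc ev => if pvJobsPass js ev then acc ++ [ev] else acc) []
      d1.insert "events" filtered
  d2.items

-- ===== PORT B =====
-- combined keep-predicate of Source B (hives clause first, jobs clause short-circuited after it)
def pvKeep (hives : Option (List String)) (jobs : Option (List String)) (ev : List (String × List String)) : Bool :=
  (match hives with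
   | none => true
   | some hs => pvHivesPass hs ev) &&
  (match jobs with
   | none => true
   | some js => pvJobsPass js ev)

def filter_events_by_beekeeping_alt (item : List (String × List (List (String × List String)))) (hives : Option (List String)) (jobs : Option (List String)) : List (String × List (List (String × List String))) :=
  match hives, jobs with
  | none, none => item
  | _, _ =>
    let d : PySem.Dict String (List (List (String × List String))) := PySem.Dict.mk item
    (d.insert "events" (((d.get? "events").getD []).filter (pvKeep hives jobs))).items

-- ===== PRECONDITION & SPEC =====
-- hives-filter condition restated for Pre_ only (declarative; vacuously true when hives is None)
def pvPreHivesOk (hives : Option (List String)) (ev : List (String × List String)) : Bool :=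
  match hives with
  | none => true
  | some hs =>
    let evh := ((PySem.Dict.mk ev).get? "hives").getD []
    hs.any (fun h => evh.contains h) || evh.contains "ALL"

-- Pre_ excludes exactly: inputs where the Python A raises KeyError (no 'events' key while a
-- filter is active; an event inspected by the hives loop without a 'hives' key; an event the
-- jobs loop reaches without a 'jobs' key), and assoc-lists with duplicate keys, on which the
-- Python dict's last-wins collapse makes any list-level reading of the input accidental.
def Pre_filter_events_by_beekeeping (item : List (String × List (List (String × List String)))) (hives : Option (List String)) (jobs : Option (List String)) : Prop :=
  (item.map Prod.fst).Nodup ∧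
  (∀ ev ∈ ((PySem.Dict.mk item).get? "events").getD [], (ev.map Prod.fst).Nodup) ∧
  ((hives ≠ none ∨ jobs ≠ none) → ((PySem.Dict.mk item).get? "events").isSome = true) ∧
  (hives ≠ none → ∀ ev ∈ ((PySem.Dict.mk item).get? "events").getD [], ((PySem.Dict.mk ev).get? "hives").isSome = true) ∧
  (jobs ≠ none → ∀ ev ∈ ((PySem.Dict.mk item).get? "events").getD [], pvPreHivesOk hives ev = true → ((PySem.Dict.mk ev).get? "jobs").isSome = true)
instance (item : List (String × List (List (String × List String)))) (hives : Option (List String)) (jobs : Option (List String)) : Decidable (Pre_filter_events_by_beekeeping item hives jobs) := by unfold Pre_filter_events_by_beekeeping; infer_instance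

def pvWitness_filter_events_by_beekeeping : (List (String × List (List (String × List String)))) × Option (List String) × Option (List String) :=
  ([("events", [[("hives", ["h1"]), ("jobs", ["inspect"])], [("hives", ["ALL"]), ("jobs", ["feed"])]])],
   some ["h1"], some ["inspect", "feed"])

def Spec_filter_events_by_beekeeping (item : List (String × List (List (String × List String)))) (hives : Option (List String)) (jobs : Option (List String)) (out : List (String × List (List (String × List String)))) : Prop := out = filter_events_by_beekeeping_alt item hives jobs
instance (item : List (String × List (List (String × List String)))) (hives : Option (List String)) (jobs : Option (List String)) (out : List (String × List (List (String × List String)))) : Decidable (Spec_filter_events_by_beekeeping item hives jobs out) := by unfold Spec_filter_events_by_beekeeping; infer_instance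

-- ===== CLAIM (what is proved, stated in full; the proofs are below) =====
def Claim_equal_filter_events_by_beekeeping : Prop := ∀ (item : List (String × List (List (String × List String)))) (hives : Option (List String)) (jobs : Option (List String)), Dom_filter_events_by_beekeeping item hives jobs → Pre_filter_events_by_beekeeping item hives jobs → Spec_filter_events_by_beekeeping item hives jobs (filter_events_by_beekeeping item hives jobs)

-- ===== LEMMAS AND PROOFS =====

-- A's accumulate-append loop is a filter
theorem pv_foldl_filter {a : Type} (p : a → Bool) (l : List a) :
    l.foldl (fun acc x => if p x then acc ++ [x] else acc) [] = l.filter p := by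
  simpa using PySem.List.foldl_append_if p id l []

-- the combined predicate, specialised at each Option shape
theorem pvKeep_some_none (hs : List String) : pvKeep (some hs) none = pvHivesPass hs := by
  funext ev; simp [pvKeep]

theorem pvKeep_none_some (js : List String) : pvKeep none (some js) = pvJobsPass js := by
  funext ev; simp [pvKeep]

theorem pvKeep_some_some (hs js : List String) (ev : List (String × List String)) :
    pvKeep (some hs) (some js) ev = (pvHivesPass hs ev && pvJobsPass js ev) := rfl

theorem pv_witness_ok :
    Dom_filter_events_by_beekeeping (pvWitness_filter_events_by_beekeeping.1) (pvWitness_filter_events_by_beekeeping.2.1) (pvWitness_filter_events_by_beekeeping.2.2) ∧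
    Pre_filter_events_by_beekeeping (pvWitness_filter_events_by_beekeeping.1) (pvWitness_filter_events_by_beekeeping.2.1) (pvWitness_filter_events_by_beekeeping.2.2) := by
  constructor <;> decide

-- ===== VERDICT (by name: the statement is the Claim_ definition above) =====
theorem filter_events_by_beekeeping_spec : Claim_equal_filter_events_by_beekeeping := by
  intro item hives jobs _hDom _hPre
  unfold Spec_filter_events_by_beekeeping
  unfold filter_events_by_beekeeping filter_events_by_beekeeping_alt
  cases hives with
  | none =>
    cases jobs with
    | none => rfl
    | some js => simp only [pv_foldl_filter, pvKeep_none_some]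
  | some hs =>
    cases jobs with
    | none => simp only [pv_foldl_filter, pvKeep_some_none]
    | some js =>
      simp only [pv_foldl_filter, PySem.Dict.get?_insert_self, Option.getD_some,
        List.filter_filter, PySem.Dict.insert_insert_self]
      have h : List.filter (fun a => pvJobsPass js a && pvHivesPass hs a)
            (((PySem.Dict.mk item).get? "events").getD [])
          = List.filter (pvKeep (some hs) (some js))
            (((PySem.Dict.mk item).get? "events").getD []) :=
        List.filter_congr (fun ev _ => by rw [pvKeep_some_some]; exact Bool.and_comm _ _)
      rw [h]
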